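-- pv_equiv track=rewrite | github.com/lwxGitHub123/Glip | labelme_to_coco5.py | create_tokens_positive
-- ===== SOURCE A (Python) =====
-- def create_tokens_positive(caption):
--     """
--     为caption创建tokens_positive
--     将整个caption分词并创建token位置区间
--
--     Args:
--         caption: 文本描述
--
--     Returns:
--         tokens_positive: 列表，每个元素是包含两个整数的列表 [start, end]
--     """
--     if not caption:
--         return []
--
--     # 简单的分词：按空格分割
--     words = caption.split()
--     tokens_positive = []
--
--     # 记录每个词的位置
--     start_idx = 0
--     for word in words:
--         end_idx = start_idx + len(word)
--         # 每个词作为一个token区间，必须是 [start, end] 格式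
--         tokens_positive.append([start_idx, end_idx])
--         start_idx = end_idx + 1  # +1 for space
--
--     return tokens_positive
-- ===== SOURCE B (Python) =====
-- def create_tokens_positive(caption):
--     """
--     为caption创建tokens_positive
--     将整个caption分词并创建token位置区间
--
--     Args:
--         caption: 文本描述
--
--     Returns:
--         tokens_positive: 列表，每个元素是包含两个整数的列表 [start, end]
--     """
--     if not caption:
--         return []
--
--     words = caption.split()
--     lens = [len(w) for w in words]
--
--     # prefix table of start offsets: each word starts one past the previous end
--     starts = [0]
--     acc = 0
--     for n in lens[:-1]:
--         acc += n + 1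
--         starts.append(acc)
--
--     return [[s, s + n] for s, n in zip(starts, lens)]
-- ===== Notes on version B (the rewrite author's own statement) =====
-- stated objective: alternative
-- what changed: Replaces A's single loop threading a start_idx accumulator that emits intervals as it goes with a precomputed word-length list, a prefix table of start offsets, and a separate zip/comprehension pass that builds the intervals.
import Mathlib
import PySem

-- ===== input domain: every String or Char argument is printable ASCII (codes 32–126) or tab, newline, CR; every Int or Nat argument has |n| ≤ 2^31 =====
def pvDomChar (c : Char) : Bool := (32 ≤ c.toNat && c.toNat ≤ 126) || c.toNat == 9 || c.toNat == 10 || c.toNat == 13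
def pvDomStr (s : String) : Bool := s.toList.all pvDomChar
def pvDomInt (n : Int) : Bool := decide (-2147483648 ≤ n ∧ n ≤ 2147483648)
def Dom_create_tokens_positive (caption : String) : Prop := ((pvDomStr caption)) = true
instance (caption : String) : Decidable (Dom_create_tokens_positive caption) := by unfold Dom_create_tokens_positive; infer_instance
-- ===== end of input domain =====

-- B replaces A's threaded start_idx loop with a precomputed prefix table of start
-- offsets plus a separate zip pass (objective: alternative decomposition, same cost).


-- ===== PORT A =====
def create_tokens_positive (caption : String) : List (List Int) :=
  if caption = "" then []
  else
    let words := PySem.Str.split₀ caption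
    -- for word in words: append [start_idx, end_idx]; start_idx = end_idx + 1
    let r := words.foldl
      (fun (st : List (List Int) × Int) (word : String) =>
        let end_idx := st.2 + PySem.Str.len word
        (st.1 ++ [[st.2, end_idx]], end_idx + 1))
      ([], 0)
    r.1

-- ===== PORT B =====
def create_tokens_positive_alt (caption : String) : List (List Int) :=
  if caption = "" then []
  else
    let words := PySem.Str.split₀ caption
    let lens := words.map (fun w => PySem.Str.len w)
    -- starts = [0]; acc = 0; for n in lens[:-1]: acc += n + 1; starts.append(acc)
    let starts := (PySem.List.slice lens none (some (-1))).foldl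
      (fun (st : List Int × Int) (n : Int) =>
        let acc := st.2 + n + 1
        (st.1 ++ [acc], acc))
      ([0], 0)
    (starts.1.zip lens).map (fun p => [p.1, p.1 + p.2])

-- ===== PRECONDITION & SPEC =====
def Spec_create_tokens_positive (caption : String) (out : List (List Int)) : Prop := out = create_tokens_positive_alt caption
instance (caption : String) (out : List (List Int)) : Decidable (Spec_create_tokens_positive caption out) := by unfold Spec_create_tokens_positive; infer_instance

-- ===== CLAIM (what is proved, stated in full; the proofs are below) =====
def Claim_equal_create_tokens_positive : Prop := ∀ (caption : String), Dom_create_tokens_positive caption → Spec_create_tokens_positive caption (create_tokens_positive caption)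

-- ===== LEMMAS AND PROOFS =====

-- canonical form of the result for a list of word lengths, starting at offset s
def ctpGo : List Int → Int → List (List Int)
  | [], _ => []
  | n :: ns, s => [s, s + n] :: ctpGo ns (s + n + 1)

-- A's fold equals the canonical form
theorem ctpA_eq (ws : List String) (acc : List (List Int)) (s : Int) :
    (ws.foldl
      (fun (st : List (List Int) × Int) (word : String) =>
        (st.1 ++ [[st.2, st.2 + PySem.Str.len word]], st.2 + PySem.Str.len word + 1))
      (acc, s)).1 = acc ++ ctpGo (ws.map (fun w => PySem.Str.len w)) s := by
  induction ws generalizing acc s with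
  | nil => simp [ctpGo]
  | cons w ws ih =>
    simp only [List.foldl, List.map, ctpGo]
    rw [ih]
    simp

-- B's starts-fold only appends: the accumulated list factors out
theorem ctpB_factor (ns : List Int) (pre l : List Int) (c : Int) :
    (ns.foldl
      (fun (st : List Int × Int) (n : Int) => (st.1 ++ [st.2 + n + 1], st.2 + n + 1))
      (pre ++ l, c)).1
    = pre ++ (ns.foldl
      (fun (st : List Int × Int) (n : Int) => (st.1 ++ [st.2 + n + 1], st.2 + n + 1))
      (l, c)).1 := by
  induction ns generalizing l c with
  | nil => rfl
  | cons n ns ih =>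
    simp only [List.foldl]
    rw [show pre ++ l ++ [c + n + 1] = pre ++ (l ++ [c + n + 1]) by simp, ih]

-- B's table-and-zip pass equals the canonical form
theorem ctpB_eq (lens : List Int) (s : Int) :
    (((lens.dropLast).foldl
      (fun (st : List Int × Int) (n : Int) => (st.1 ++ [st.2 + n + 1], st.2 + n + 1))
      ([s], s)).1.zip lens).map (fun p => [p.1, p.1 + p.2])
    = ctpGo lens s := by
  induction lens generalizing s with
  | nil => simp [ctpGo]
  | cons n ns ih =>
    cases ns with
    | nil => simp [ctpGo]
    | cons m ms =>
      simp only [List.dropLast_cons_of_ne_nil (by simp : m :: ms ≠ []), List.foldl]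
      rw [show ([s] ++ [s + n + 1] : List Int) = [s] ++ ([s + n + 1]) by simp,
        ctpB_factor ((m :: ms).dropLast) [s] ([s + n + 1]) (s + n + 1)]
      simp only [List.singleton_append, List.zip_cons_cons, List.map_cons, ctpGo]
      rw [ih (s + n + 1)]; simp [ctpGo]

theorem create_tokens_positive_eq (caption : String) :
    create_tokens_positive caption = create_tokens_positive_alt caption := by
  simp only [create_tokens_positive, create_tokens_positive_alt]
  split
  · rfl
  · simp only [PySem.List.slice_to_neg_one]
    rw [ctpA_eq, ← ctpB_eq]
    simp

-- ===== VERDICT (by name: the statement is the Claim_ definition above) =====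
theorem create_tokens_positive_spec : Claim_equal_create_tokens_positive := by
  intro caption _
  exact create_tokens_positive_eq caption
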